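-- pv_equiv track=rewrite | github.com/GoldenPickaxe/AV-BVConvert | bv2av.py | bv2av
-- ===== SOURCE A (Python) =====
-- table = 'fZodR9XQDSUm21yCkr6zBqiveYah8bt4xsWpHnJE7jL5VG3guMTKNPAwcF'
--
-- def bv2av(bv:str):
--     av = []
--     for each in bv:
--         av.append(table.find(each))
--     av[0] *= 38068692544
--     av[1] *= 3364
--     av[2] *= 11316496
--     av[3] *= 128063081718016
--     av[4] *= 656356768
--     av[5] *= 7427658739644928
--     av[6] *= 195112
--     av[7] *= 2207984167552
--     av[8] *= 58
--     av[9] *= 1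
--     av = sum(av) - 100618342136696320
--     av = av ^ 0b1010100100111011001100100100
--     return av
-- ===== SOURCE B (Python) =====
-- table = 'fZodR9XQDSUm21yCkr6zBqiveYah8bt4xsWpHnJE7jL5VG3guMTKNPAwcF'
--
-- # positions ordered by descending base-58 exponent, so the result is a Horner evaluation
-- _ORDER = (5, 3, 7, 0, 4, 2, 6, 1, 8, 9)
--
-- def bv2av(bv: str):
--     acc = 0
--     for p in _ORDER:
--         acc = acc * 58 + table.find(bv[p])
--     acc += sum(table.find(c) for c in bv[10:])
--     return (acc - 100618342136696320) ^ 0b1010100100111011001100100100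
-- ===== Notes on version B (the rewrite author's own statement) =====
-- stated objective: alternative
-- what changed: Replaces the build-a-list-then-mutate-ten-slots-then-sum scheme with a Horner evaluation of the base-58 digits in descending-exponent position order, plus the weight-1 tail for characters past index 9.
import Mathlib
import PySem

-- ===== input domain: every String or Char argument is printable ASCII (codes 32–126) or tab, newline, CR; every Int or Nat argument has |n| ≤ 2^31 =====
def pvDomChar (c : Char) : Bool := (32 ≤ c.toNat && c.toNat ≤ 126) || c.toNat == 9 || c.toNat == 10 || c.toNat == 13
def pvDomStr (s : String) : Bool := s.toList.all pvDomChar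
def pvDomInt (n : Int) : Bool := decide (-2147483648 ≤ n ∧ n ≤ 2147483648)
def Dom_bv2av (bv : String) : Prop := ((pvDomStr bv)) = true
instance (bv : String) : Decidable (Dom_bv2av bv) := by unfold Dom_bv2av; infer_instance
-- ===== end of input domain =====

-- B evaluates the same base-58 number by Horner's rule over the descending-exponent position order instead of mutating ten list slots; no speed claim (alternative decomposition).

def bvTable : String := "fZodR9XQDSUm21yCkr6zBqiveYah8bt4xsWpHnJE7jL5VG3guMTKNPAwcF"

-- table.find(c) for a single character c
def tfind (c : Char) : Int := PySem.Str.find bvTable (String.ofList [c])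

-- ===== PORT A =====
def bv2av (bv : String) : Int :=
  let av : List Int := bv.toList.foldl (fun acc c => acc ++ [tfind c]) []
  let av := av.set 0 (av.getD 0 0 * 38068692544)
  let av := av.set 1 (av.getD 1 0 * 3364)
  let av := av.set 2 (av.getD 2 0 * 11316496)
  let av := av.set 3 (av.getD 3 0 * 128063081718016)
  let av := av.set 4 (av.getD 4 0 * 656356768)
  let av := av.set 5 (av.getD 5 0 * 7427658739644928)
  let av := av.set 6 (av.getD 6 0 * 195112)
  let av := av.set 7 (av.getD 7 0 * 2207984167552)
  let av := av.set 8 (av.getD 8 0 * 58)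
  let av := av.set 9 (av.getD 9 0 * 1)
  PySem.Int.bxor (av.sum - 100618342136696320) 0b1010100100111011001100100100

-- ===== PORT B =====
def bvOrder : List Nat := [5, 3, 7, 0, 4, 2, 6, 1, 8, 9]

def bv2av_alt (bv : String) : Int :=
  let cs := bv.toList
  let acc := bvOrder.foldl (fun acc p => acc * 58 + tfind (cs.getD p ' ')) 0
  let acc := acc + ((cs.drop 10).map tfind).sum
  PySem.Int.bxor (acc - 100618342136696320) 0b1010100100111011001100100100

-- ===== PRECONDITION & SPEC =====
-- Pre_ excludes strings shorter than 10 characters, on which Python A raises IndexError (av[9]).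
def Pre_bv2av (bv : String) : Prop := 10 ≤ bv.toList.length
instance (bv : String) : Decidable (Pre_bv2av bv) := by unfold Pre_bv2av; infer_instance
def pvWitness_bv2av : String := "BV17x411w7KC"

def Spec_bv2av (bv : String) (out : Int) : Prop := out = bv2av_alt bv
instance (bv : String) (out : Int) : Decidable (Spec_bv2av bv out) := by unfold Spec_bv2av; infer_instance

-- ===== CLAIM (what is proved, stated in full; the proofs are below) =====
def Claim_equal_bv2av : Prop := ∀ (bv : String), Dom_bv2av bv → Pre_bv2av bv → Spec_bv2av bv (bv2av bv)

-- ===== LEMMAS AND PROOFS =====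

-- ===== VERDICT (by name: the statement is the Claim_ definition above) =====
theorem bv2av_spec : Claim_equal_bv2av := by
  intro bv _ hpre
  unfold Pre_bv2av at hpre
  unfold Spec_bv2av bv2av bv2av_alt
  generalize hg : bv.toList = cs at hpre ⊢
  obtain ⟨c0, cs, rfl⟩ : ∃ c t, cs = c :: t := List.exists_cons_of_ne_nil (by rintro rfl; simp at hpre)
  simp only [List.length_cons] at hpre
  obtain ⟨c1, cs, rfl⟩ : ∃ c t, cs = c :: t := List.exists_cons_of_ne_nil (by rintro rfl; simp at hpre)
  simp only [List.length_cons] at hpre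
  obtain ⟨c2, cs, rfl⟩ : ∃ c t, cs = c :: t := List.exists_cons_of_ne_nil (by rintro rfl; simp at hpre)
  simp only [List.length_cons] at hpre
  obtain ⟨c3, cs, rfl⟩ : ∃ c t, cs = c :: t := List.exists_cons_of_ne_nil (by rintro rfl; simp at hpre)
  simp only [List.length_cons] at hpre
  obtain ⟨c4, cs, rfl⟩ : ∃ c t, cs = c :: t := List.exists_cons_of_ne_nil (by rintro rfl; simp at hpre)
  simp only [List.length_cons] at hpre
  obtain ⟨c5, cs, rfl⟩ : ∃ c t, cs = c :: t := List.exists_cons_of_ne_nil (by rintro rfl; simp at hpre)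
  simp only [List.length_cons] at hpre
  obtain ⟨c6, cs, rfl⟩ : ∃ c t, cs = c :: t := List.exists_cons_of_ne_nil (by rintro rfl; simp at hpre)
  simp only [List.length_cons] at hpre
  obtain ⟨c7, cs, rfl⟩ : ∃ c t, cs = c :: t := List.exists_cons_of_ne_nil (by rintro rfl; simp at hpre)
  simp only [List.length_cons] at hpre
  obtain ⟨c8, cs, rfl⟩ : ∃ c t, cs = c :: t := List.exists_cons_of_ne_nil (by rintro rfl; simp at hpre)
  simp only [List.length_cons] at hpre
  obtain ⟨c9, cs, rfl⟩ : ∃ c t, cs = c :: t := List.exists_cons_of_ne_nil (by rintro rfl; simp at hpre)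
  simp [bvOrder, List.getD, Function.comp_def]
  congr 1
  ring
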